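-- pv_equiv track=rewrite | github.com/zeniverse/-algorithm-practice | Programmers/Level3/양과 늑대(2).py | solution
-- ===== SOURCE A (Python) =====
-- def solution(info, edges):
--     visited = [False] * len(info)
--     visited[0] = True
--
--     res = []
--
--     def dfs(sheep, wolf):
--         if sheep > wolf:
--             res.append(sheep)
--         else:
--             return
--
--         for parent, child in edges:
--             isWolf = info[child]
--
--             if visited[parent] and not visited[child]:
--                 visited[child] = True
--                 dfs(sheep + (isWolf == 0), wolf + (isWolf == 1))
--                 visited[child] = False
--
--     dfs(1, 0)
--
--     return max(res)
-- ===== SOURCE B (Python) =====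
-- def solution(info, edges):
--     # Frontier DFS over a precomputed children adjacency (return value only;
--     # does not mutate its arguments): expand any unvisited frontier node,
--     # folding the maximum sheep count along the way.
--     n = len(info)
--     children = [[] for _ in range(n)]
--     for parent, child in edges:
--         children[parent].append(child)
--
--     def dfs(sheep, wolf, visited, frontier):
--         if sheep <= wolf:
--             return 0
--         best = sheep
--         for node in frontier:
--             if visited[node]:
--                 continue
--             nv = visited.copy()
--             nv[node] = True
--             nf = [x for x in frontier if not nv[x]] + children[node]
--             s = dfs(sheep + (info[node] == 0), wolf + (info[node] == 1), nv, nf)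
--             if s > best:
--                 best = s
--         return best
--
--     visited = [False] * n
--     visited[0] = True
--     return dfs(1, 0, visited, list(children[0]))
-- ===== Notes on version B (the rewrite author's own statement) =====
-- stated objective: alternative
-- what changed: Replaces A's mutable visited-array DFS that rescans the entire edge list at every node and appends results to a global list maxed at the end, by a DFS over an incrementally maintained frontier list fed from a precomputed children adjacency, folding the maximum along the way; Pre_ excludes only the inputs where A raises (empty info, non-pair edge, |index| >= len(info)).
import Mathlib
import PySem

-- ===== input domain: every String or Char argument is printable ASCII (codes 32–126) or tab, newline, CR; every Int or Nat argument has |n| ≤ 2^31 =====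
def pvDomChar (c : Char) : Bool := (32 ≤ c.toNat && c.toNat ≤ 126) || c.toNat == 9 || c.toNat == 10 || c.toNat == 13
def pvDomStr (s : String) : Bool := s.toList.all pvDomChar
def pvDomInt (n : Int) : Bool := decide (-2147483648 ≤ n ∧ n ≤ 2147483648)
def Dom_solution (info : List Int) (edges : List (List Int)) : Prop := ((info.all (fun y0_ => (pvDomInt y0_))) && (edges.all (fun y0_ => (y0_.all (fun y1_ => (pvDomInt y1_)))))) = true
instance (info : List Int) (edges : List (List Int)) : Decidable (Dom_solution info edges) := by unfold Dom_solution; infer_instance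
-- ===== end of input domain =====

-- B replaces A's mutable visited-array DFS rescanning the whole edge list at every node
-- by a DFS over an incrementally maintained frontier list fed from a precomputed
-- children adjacency, folding the maximum along the way (alternative decomposition,
-- same cost class); equivalence is about the return value (neither mutates arguments).

-- ===== PORT A =====
-- loop body of A's 'for parent, child in edges' (rec = the recursive call at the next fuel)
def bodyA (info : List Int) (rec : Int → Int → List Bool → List Int → List Int)
    (sheep wolf : Int) (visited : List Bool) (r : List Int) (e : List Int) : List Int :=
  match e with
  | [parent, child] =>
    let isWolf := PySem.List.pyGetD info child 0
    if PySem.List.pyGetD visited parent false && !PySem.List.pyGetD visited child false then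
      rec (sheep + (if isWolf = 0 then 1 else 0)) (wolf + (if isWolf = 1 then 1 else 0))
        (PySem.List.pySetD visited child true) r
    else r
  | _ => r   -- Python raises on a non-pair edge; excluded by Pre_

def dfsA (info : List Int) (edges : List (List Int)) :
    Nat → Int → Int → List Bool → List Int → List Int
  | 0, _, _, _, res => res   -- fuel guard only; never reached from `solution`
  | fuel+1, sheep, wolf, visited, res =>
    if wolf < sheep then
      edges.foldl (bodyA info (dfsA info edges fuel) sheep wolf visited) (res ++ [sheep])
    else res

def solution (info : List Int) (edges : List (List Int)) : Int :=
  let visited := PySem.List.pySetD (List.replicate info.length false) 0 true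
  let res := dfsA info edges (info.length + 1) 1 0 visited []
  (PySem.List.max? res (fun x => x)).getD 0   -- max(res); res ≠ [] whenever A returns (Pre_)

-- ===== PORT B =====
-- loop body of B's "children[parent].append(child)" (exact for the in-range indices Pre_ admits)
def buildStep (ch : List (List Int)) (e : List Int) : List (List Int) :=
  match e with
  | [parent, child] =>
    PySem.List.pySetD ch parent (PySem.List.pyGetD ch parent [] ++ [child])
  | _ => ch   -- Python raises on a non-pair edge; excluded by Pre_

def childrenOf (n : Nat) (edges : List (List Int)) : List (List Int) :=
  edges.foldl buildStep (List.replicate n [])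

-- loop body of B's 'for node in frontier' (rec = the recursive call at the next fuel)
def bodyB (info : List Int) (children : List (List Int))
    (rec : Int → Int → List Bool → List Int → Int)
    (frontier : List Int) (sheep wolf : Int) (visited : List Bool)
    (best node : Int) : Int :=
  if PySem.List.pyGetD visited node false then best
  else
    let nv := PySem.List.pySetD visited node true
    let nf := frontier.filter (fun x => !PySem.List.pyGetD nv x false) ++
              PySem.List.pyGetD children node []
    let s := rec (sheep + (if PySem.List.pyGetD info node 0 = 0 then 1 else 0))
                 (wolf + (if PySem.List.pyGetD info node 0 = 1 then 1 else 0)) nv nf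
    if best < s then s else best

def dfsB (info : List Int) (children : List (List Int)) :
    Nat → Int → Int → List Bool → List Int → Int
  | 0, _, _, _, _ => 0   -- fuel guard only; never reached from `solution_alt`
  | fuel+1, sheep, wolf, visited, frontier =>
    if sheep ≤ wolf then 0
    else frontier.foldl
      (bodyB info children (dfsB info children fuel) frontier sheep wolf visited) sheep

def solution_alt (info : List Int) (edges : List (List Int)) : Int :=
  let n := info.length
  let children := childrenOf n edges
  let visited := PySem.List.pySetD (List.replicate n false) 0 true
  dfsB info children (n + 1) 1 0 visited (PySem.List.pyGetD children 0 [])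

-- ===== PRECONDITION & SPEC =====
-- Pre_ excludes exactly the inputs on which A raises: empty info (IndexError on
-- visited[0]), an edge that is not a 2-element list (unpacking ValueError), or an
-- edge index outside [-len(info), len(info)) (IndexError).
def Pre_solution (info : List Int) (edges : List (List Int)) : Prop :=
  info ≠ [] ∧ ∀ e ∈ edges, e.length = 2 ∧
    ∀ x ∈ e, -(info.length : Int) ≤ x ∧ x < (info.length : Int)
instance (info : List Int) (edges : List (List Int)) : Decidable (Pre_solution info edges) := by
  unfold Pre_solution; infer_instance

def pvWitness_solution : List Int × List (List Int) := ([0, 0, 1, 0], [[0, 1], [1, 2], [1, 3]])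

def Spec_solution (info : List Int) (edges : List (List Int)) (out : Int) : Prop := out = solution_alt info edges
instance (info : List Int) (edges : List (List Int)) (out : Int) : Decidable (Spec_solution info edges out) := by unfold Spec_solution; infer_instance

-- ===== CLAIM (what is proved, stated in full; the proofs are below) =====
def Claim_equal_solution : Prop := ∀ (info : List Int) (edges : List (List Int)), Dom_solution info edges → Pre_solution info edges → Spec_solution info edges (solution info edges)

-- ===== LEMMAS AND PROOFS =====

-- edges as shaped pairs of in-range (possibly negative, Python-style) indices
def goodEdges (info : List Int) (edges : List (List Int)) : Prop :=
  ∀ e ∈ edges, ∃ p c : Int, e = [p, c] ∧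
    -(info.length : Int) ≤ p ∧ p < (info.length : Int) ∧
    -(info.length : Int) ≤ c ∧ c < (info.length : Int)

lemma goodEdges_of_pre {info : List Int} {edges : List (List Int)}
    (h : ∀ e ∈ edges, e.length = 2 ∧
      ∀ x ∈ e, -(info.length : Int) ≤ x ∧ x < (info.length : Int)) :
    goodEdges info edges := by
  intro e he
  obtain ⟨hlen, hmem⟩ := h e he
  obtain ⟨p, c, rfl⟩ := List.length_eq_two.mp hlen
  exact ⟨p, c, rfl, (hmem p (by simp)).1, (hmem p (by simp)).2,
    (hmem c (by simp)).1, (hmem c (by simp)).2⟩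

-- Python's canonical meaning of index x into a list of length n is x % n
lemma mod_idx_eq {x n : Int} (h1 : -n ≤ x) (h2 : x < n) (hx : 0 < n) :
    PySem.Int.mod x n = if 0 ≤ x then x else x + n := by
  rw [PySem.Int.mod_eq_emod_of_pos hx]
  by_cases h : 0 ≤ x
  · simp only [if_pos h]
    exact Int.emod_eq_of_lt h h2
  · simp only [if_neg h]
    have h3 : (x + n) % n = x % n := by
      have h4 := Int.add_mul_emod_self_left (a := x) (b := n) (c := 1)
      rwa [mul_one] at h4
    rw [← h3]
    exact Int.emod_eq_of_lt (by omega) (by omega)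

lemma pyIdx_mod (len : Nat) (x : Int) (h1 : -(len : Int) ≤ x) (h2 : x < (len : Int)) :
    PySem.List.pyIdx? len x = PySem.List.pyIdx? len (PySem.Int.mod x len) := by
  have hx : 0 < (len : Int) := by omega
  rw [mod_idx_eq h1 h2 hx]
  by_cases h : 0 ≤ x
  · simp [h]
  · simp only [PySem.List.pyIdx?, if_neg h, if_pos h1, if_pos (by omega : (0:Int) ≤ x + len),
      if_pos (by omega : x + (len:Int) < len)]
    congr 1
    have : ((-x).toNat : Int) = -x := Int.toNat_of_nonneg (by omega)
    omega

lemma pyGetD_mod {α : Type} (l : List α) (x : Int) (d : α)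
    (h1 : -(l.length : Int) ≤ x) (h2 : x < (l.length : Int)) :
    PySem.List.pyGetD l x d = PySem.List.pyGetD l (PySem.Int.mod x l.length) d := by
  simp only [PySem.List.pyGetD, PySem.List.pyGet?, pyIdx_mod l.length x h1 h2]

lemma pySetD_mod {α : Type} (l : List α) (x : Int) (v : α)
    (h1 : -(l.length : Int) ≤ x) (h2 : x < (l.length : Int)) :
    PySem.List.pySetD l x v = PySem.List.pySetD l (PySem.Int.mod x l.length) v := by
  simp only [PySem.List.pySetD, PySem.List.pySet?, pyIdx_mod l.length x h1 h2]

-- reading after writing, both through Python indices: aliasing is modulo the length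
lemma pyGetD_pySetD_mod {α : Type} (l : List α) (p q : Int) (v d : α)
    (hp1 : -(l.length : Int) ≤ p) (hp2 : p < (l.length : Int))
    (hq1 : -(l.length : Int) ≤ q) (hq2 : q < (l.length : Int)) :
    PySem.List.pyGetD (PySem.List.pySetD l p v) q d =
      if PySem.Int.mod q (l.length : Int) = PySem.Int.mod p (l.length : Int) then v
      else PySem.List.pyGetD l q d := by
  have hl : (0 : Int) < (l.length : Int) := by omega
  obtain ⟨kp, hkp⟩ : ∃ k : Nat, PySem.Int.mod p (l.length : Int) = (k : Int) :=
    ⟨(PySem.Int.mod p (l.length : Int)).toNat,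
      (Int.toNat_of_nonneg (PySem.Int.mod_nonneg _ hl)).symm⟩
  obtain ⟨kq, hkq⟩ : ∃ k : Nat, PySem.Int.mod q (l.length : Int) = (k : Int) :=
    ⟨(PySem.Int.mod q (l.length : Int)).toNat,
      (Int.toNat_of_nonneg (PySem.Int.mod_nonneg _ hl)).symm⟩
  have hkpl : kp < l.length := by
    have := PySem.Int.mod_lt p hl; omega
  have hset : PySem.List.pySetD l p v = PySem.List.pySetD l ((kp : Nat) : Int) v := by
    rw [pySetD_mod l p v hp1 hp2, hkp]
  have hlen : (PySem.List.pySetD l ((kp : Nat) : Int) v).length = l.length := by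
    rw [PySem.List.pySetD_natCast]; simp
  have hqset : PySem.List.pyGetD (PySem.List.pySetD l ((kp : Nat) : Int) v) q d
      = PySem.List.pyGetD (PySem.List.pySetD l ((kp : Nat) : Int) v) ((kq : Nat) : Int) d := by
    rw [pyGetD_mod _ q d (by rw [hlen]; omega) (by rw [hlen]; omega), hlen, hkq]
  rw [hset, hqset, PySem.List.pyGetD_pySetD_natCast l kp kq v d hkpl, hkp, hkq]
  by_cases h : kq = kp
  · rw [if_pos h, if_pos (show ((kq : Nat) : Int) = ((kp : Nat) : Int) by exact_mod_cast h)]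
  · rw [if_neg h, if_neg (show ¬ ((kq : Nat) : Int) = ((kp : Nat) : Int) by exact_mod_cast h),
      ← hkq, ← pyGetD_mod l q d hq1 hq2]

lemma pyGetD_replicate {α : Type} (n : Nat) (q : Int) (d v : α)
    (hq1 : -(n : Int) ≤ q) (hq2 : q < (n : Int)) :
    PySem.List.pyGetD (List.replicate n v) q d = v := by
  have hl : (0 : Int) < (n : Int) := by omega
  obtain ⟨kq, hkq⟩ : ∃ k : Nat, PySem.Int.mod q (n : Int) = (k : Int) :=
    ⟨(PySem.Int.mod q (n : Int)).toNat,
      (Int.toNat_of_nonneg (PySem.Int.mod_nonneg _ hl)).symm⟩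
  have hkql : kq < n := by
    have := PySem.Int.mod_lt q hl; omega
  have h0 : PySem.List.pyGetD (List.replicate n v) q d
      = PySem.List.pyGetD (List.replicate n v) ((kq : Nat) : Int) d := by
    rw [pyGetD_mod _ q d (by simp; omega) (by simp; omega)]
    simp only [List.length_replicate]
    rw [hkq]
  rw [h0, PySem.List.pyGetD_natCast]
  simp [List.getD, hkql]

-- the canonical node id a Python index denotes
def canId (n : Nat) (x : Int) : Int := PySem.Int.mod x (n : Int)

lemma canId_zero {n : Nat} (hn : 0 < n) : canId n 0 = 0 := by
  unfold canId
  rw [PySem.Int.mod_eq_emod_of_pos (by omega)]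
  simp

-- ===== the children adjacency built by B =====

lemma length_foldl_buildStep :
    ∀ (l : List (List Int)) (ch : List (List Int)),
      (l.foldl buildStep ch).length = ch.length := by
  intro l
  induction l with
  | nil => intro ch; rfl
  | cons e t ih =>
    intro ch
    rw [List.foldl_cons, ih]
    rcases e with _ | ⟨a, _ | ⟨b, _ | ⟨c, r⟩⟩⟩ <;>
      simp [buildStep, PySem.List.length_pySetD]

lemma childrenOf_length (n : Nat) (edges : List (List Int)) :
    (childrenOf n edges).length = n := by
  rw [childrenOf, length_foldl_buildStep]; simp

lemma mem_foldl_buildStep (n : Nat) (q x : Int)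
    (hq1 : -(n : Int) ≤ q) (hq2 : q < (n : Int)) :
    ∀ (l : List (List Int)),
      (∀ e ∈ l, ∃ p c : Int, e = [p, c] ∧
        -(n : Int) ≤ p ∧ p < (n : Int) ∧ -(n : Int) ≤ c ∧ c < (n : Int)) →
      ∀ ch : List (List Int), ch.length = n →
      (x ∈ PySem.List.pyGetD (l.foldl buildStep ch) q [] ↔
        x ∈ PySem.List.pyGetD ch q [] ∨
          ∃ p c : Int, [p, c] ∈ l ∧ canId n p = canId n q ∧ c = x) := by
  intro l
  induction l with
  | nil => intro _ ch _; simp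
  | cons e t ih =>
    intro hgood ch hch
    obtain ⟨p0, c0, rfl, hp1, hp2, hc1, hc2⟩ := hgood e List.mem_cons_self
    have hgood' := fun e h => hgood e (List.mem_cons_of_mem _ h)
    rw [List.foldl_cons]
    have hch' : (buildStep ch [p0, c0]).length = n := by
      simp [buildStep, PySem.List.length_pySetD, hch]
    rw [ih hgood' _ hch']
    have hstep : PySem.List.pyGetD (buildStep ch [p0, c0]) q [] =
        if canId n q = canId n p0 then PySem.List.pyGetD ch p0 [] ++ [c0]
        else PySem.List.pyGetD ch q [] := by
      simp only [buildStep]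
      rw [pyGetD_pySetD_mod ch p0 q _ _ (by omega) (by omega) (by omega) (by omega), hch]
      rfl
    rw [hstep]
    by_cases hcan : canId n q = canId n p0
    · rw [if_pos hcan]
      have hpq : PySem.List.pyGetD ch p0 [] = PySem.List.pyGetD ch q [] := by
        rw [pyGetD_mod ch p0 [] (by omega) (by omega),
          pyGetD_mod ch q [] (by omega) (by omega), hch]
        unfold canId at hcan
        rw [hcan]
      rw [hpq]
      simp only [List.mem_append, List.mem_cons, List.not_mem_nil, or_false]
      constructor
      · rintro ((hx | rfl) | ⟨p, c, hm, hcp, rfl⟩)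
        · exact Or.inl hx
        · exact Or.inr ⟨p0, x, Or.inl rfl, hcan.symm, rfl⟩
        · exact Or.inr ⟨p, c, Or.inr hm, hcp, rfl⟩
      · rintro (hx | ⟨p, c, heq | hm', hcp, rfl⟩)
        · exact Or.inl (Or.inl hx)
        · injection heq with h1 h2
          injection h2 with h2 _
          subst h1; subst h2
          exact Or.inl (Or.inr rfl)
        · exact Or.inr ⟨p, c, hm', hcp, rfl⟩
    · rw [if_neg hcan]
      constructor
      · rintro (hx | ⟨p, c, hm, hcp, rfl⟩)
        · exact Or.inl hx
        · exact Or.inr ⟨p, c, List.mem_cons_of_mem _ hm, hcp, rfl⟩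
      · rintro (hx | ⟨p, c, hm, hcp, rfl⟩)
        · exact Or.inl hx
        · rcases List.mem_cons.mp hm with heq | hm'
          · injection heq with h1 h2
            injection h2 with h2 _
            subst h1; subst h2
            exact absurd hcp.symm hcan
          · exact Or.inr ⟨p, c, hm', hcp, rfl⟩

lemma mem_bucket {info : List Int} {edges : List (List Int)}
    (hg : goodEdges info edges) (q x : Int)
    (hq1 : -(info.length : Int) ≤ q) (hq2 : q < (info.length : Int)) :
    x ∈ PySem.List.pyGetD (childrenOf info.length edges) q [] ↔
      ∃ p : Int, [p, x] ∈ edges ∧ canId info.length p = canId info.length q := by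
  rw [childrenOf, mem_foldl_buildStep info.length q x hq1 hq2 edges hg
    (List.replicate info.length []) (by simp)]
  have hrep : PySem.List.pyGetD (List.replicate info.length ([] : List Int)) q [] = [] :=
    pyGetD_replicate info.length q [] [] hq1 hq2
  rw [hrep]
  simp only [List.not_mem_nil, false_or]
  constructor
  · rintro ⟨p, c, hm, hcp, rfl⟩; exact ⟨p, hm, hcp⟩
  · rintro ⟨p, hm, hcp⟩; exact ⟨p, x, hm, hcp, rfl⟩

-- ===== A-side loop shape =====

lemma dfsA_append (info : List Int) (edges : List (List Int)) :
    ∀ (fuel : Nat) (s w : Int) (vis : List Bool) (res : List Int),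
      dfsA info edges fuel s w vis res = res ++ dfsA info edges fuel s w vis [] := by
  intro fuel
  induction fuel with
  | zero => intro s w vis res; simp [dfsA]
  | succ n ih =>
    have hbody : ∀ (s w : Int) (vis : List Bool) (r₁ r₂ : List Int) (e : List Int),
        bodyA info (dfsA info edges n) s w vis (r₁ ++ r₂) e =
          r₁ ++ bodyA info (dfsA info edges n) s w vis r₂ e := by
      intro s w vis r₁ r₂ e
      rcases e with _ | ⟨p, _ | ⟨c, _ | ⟨d, t⟩⟩⟩ <;> simp only [bodyA]
      split
      · rw [ih _ _ _ (r₁ ++ r₂), ih _ _ _ r₂, List.append_assoc]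
      · rfl
    have hfold : ∀ (s w : Int) (vis : List Bool) (l : List (List Int)) (r₁ r₂ : List Int),
        l.foldl (bodyA info (dfsA info edges n) s w vis) (r₁ ++ r₂) =
          r₁ ++ l.foldl (bodyA info (dfsA info edges n) s w vis) r₂ := by
      intro s w vis l
      induction l with
      | nil => intro r₁ r₂; rfl
      | cons e t iht => intro r₁ r₂; rw [List.foldl_cons, hbody, iht, List.foldl_cons]
    intro s w vis res
    by_cases h : w < s
    · simp only [dfsA, if_pos h]
      rw [show res ++ [s] = res ++ ([] ++ [s]) by simp, hfold]
    · simp [dfsA, h]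

-- the contribution of one edge to A's result list
def stepA (info : List Int) (edges : List (List Int)) (fuel : Nat)
    (s w : Int) (vis : List Bool) (e : List Int) : List Int :=
  match e with
  | [p, c] =>
    if PySem.List.pyGetD vis p false && !PySem.List.pyGetD vis c false then
      dfsA info edges fuel (s + (if PySem.List.pyGetD info c 0 = 0 then 1 else 0))
        (w + (if PySem.List.pyGetD info c 0 = 1 then 1 else 0))
        (PySem.List.pySetD vis c true) []
    else []
  | _ => []

lemma dfsA_succ_pos (info : List Int) (edges : List (List Int)) (fuel : Nat)
    (s w : Int) (vis : List Bool) (h : w < s) :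
    dfsA info edges (fuel+1) s w vis [] = s :: edges.flatMap (stepA info edges fuel s w vis) := by
  simp only [dfsA, if_pos h, List.nil_append]
  have : edges.foldl (bodyA info (dfsA info edges fuel) s w vis) [s] =
      edges.foldl (fun r e => r ++ stepA info edges fuel s w vis e) [s] := by
    apply PySem.List.foldl_congr_mem
    intro r e _
    rcases e with _ | ⟨p, _ | ⟨c, _ | ⟨d, t⟩⟩⟩ <;> simp only [bodyA, stepA]
    · simp
    · simp
    · split
      · exact dfsA_append info edges fuel _ _ _ r
      · simp
    · simp
  rw [this, PySem.List.foldl_append_eq_flatMap]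
  rfl

lemma dfsA_prune (info : List Int) (edges : List (List Int)) (fuel : Nat)
    (s w : Int) (vis : List Bool) (h : s ≤ w) :
    dfsA info edges fuel s w vis [] = [] := by
  cases fuel with
  | zero => rfl
  | succ n => simp [dfsA, not_lt.mpr h]

-- ===== B-side loop shape =====

-- the value B computes for one expandable frontier entry
def valB (info : List Int) (children : List (List Int)) (fuel : Nat)
    (s w : Int) (vis : List Bool) (fr : List Int) (c : Int) : Int :=
  dfsB info children fuel
    (s + (if PySem.List.pyGetD info c 0 = 0 then 1 else 0))
    (w + (if PySem.List.pyGetD info c 0 = 1 then 1 else 0))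
    (PySem.List.pySetD vis c true)
    (fr.filter (fun x => !PySem.List.pyGetD (PySem.List.pySetD vis c true) x false) ++
      PySem.List.pyGetD children c [])

lemma dfsB_prune (info : List Int) (ch : List (List Int)) (fuel : Nat)
    (s w : Int) (vis : List Bool) (fr : List Int) (h : s ≤ w) :
    dfsB info ch fuel s w vis fr = 0 := by
  cases fuel with
  | zero => rfl
  | succ n => simp [dfsB, h]

-- B's loop is a running max of valB over the unvisited frontier entries
lemma dfsB_fold_eq_max (info : List Int) (ch : List (List Int)) (fuel : Nat)
    (fr : List Int) (s w : Int) (vis : List Bool) :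
    ∀ (l : List Int) (init : Int),
      l.foldl (bodyB info ch (dfsB info ch fuel) fr s w vis) init =
        List.foldl max init
          ((l.filter (fun node => !PySem.List.pyGetD vis node false)).map
            (valB info ch fuel s w vis fr)) := by
  intro l
  induction l with
  | nil => intro init; rfl
  | cons c t ih =>
    intro init
    by_cases hv : PySem.List.pyGetD vis c false = true
    · have hb : bodyB info ch (dfsB info ch fuel) fr s w vis init c = init := by
        simp only [bodyB, hv, if_true]
      rw [List.foldl_cons, hb, ih]
      congr 1
      simp [hv]
    · have hv' : PySem.List.pyGetD vis c false = false := by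
        cases h : PySem.List.pyGetD vis c false
        · rfl
        · exact absurd h hv
      have hfil : List.filter (fun node => !PySem.List.pyGetD vis node false) (c :: t)
          = c :: List.filter (fun node => !PySem.List.pyGetD vis node false) t := by
        simp [hv']
      have hb : bodyB info ch (dfsB info ch fuel) fr s w vis init c
          = max init (valB info ch fuel s w vis fr c) := by
        simp only [bodyB, hv', Bool.false_eq_true, if_false, valB]
        omega
      rw [List.foldl_cons, hb, ih, hfil, List.map_cons, List.foldl_cons]

lemma foldl_max_eq_of_mem_iff (m1 m2 : List Int) (h : ∀ a, a ∈ m1 ↔ a ∈ m2) :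
    ∀ x : Int, List.foldl max x m1 = List.foldl max x m2 := by
  intro x
  have h1 := PySem.List.le_foldl_max m1 x
  have h2 := PySem.List.le_foldl_max m2 x
  have hm1 := PySem.List.foldl_max_mem m1 x
  have hm2 := PySem.List.foldl_max_mem m2 x
  apply le_antisymm
  · rcases hm1 with he | hmem
    · rw [he]; exact h2.1
    · exact h2.2 _ ((h _).mp hmem)
  · rcases hm2 with he | hmem
    · rw [he]; exact h1.1
    · exact h1.2 _ ((h _).mpr hmem)

lemma foldl_max_max (m : List Int) : ∀ x s : Int,
    List.foldl max (max x s) m = max x (List.foldl max s m) := by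
  induction m with
  | nil => intro x s; rfl
  | cons a t ih =>
    intro x s
    rw [List.foldl_cons, List.foldl_cons, max_assoc, ih]

lemma dfsB_nonneg (info : List Int) (ch : List (List Int)) (fuel : Nat)
    (s w : Int) (vis : List Bool) (fr : List Int) (hw : 0 ≤ w) :
    0 ≤ dfsB info ch fuel s w vis fr := by
  cases fuel with
  | zero => exact le_refl 0
  | succ n =>
    simp only [dfsB]
    split
    · exact le_refl 0
    · rename_i h
      rw [dfsB_fold_eq_max]
      have := (PySem.List.le_foldl_max
        ((fr.filter (fun node => !PySem.List.pyGetD vis node false)).map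
          (valB info ch n s w vis fr)) s).1
      omega

-- two Python indices denoting the same node give the same recursive value
lemma valB_alias (info : List Int) (ch : List (List Int))
    (hch : ch.length = info.length) (fuel : Nat) (s w : Int)
    (vis : List Bool) (hv : vis.length = info.length) (fr : List Int) {c x : Int}
    (hc1 : -(info.length : Int) ≤ c) (hc2 : c < (info.length : Int))
    (hx1 : -(info.length : Int) ≤ x) (hx2 : x < (info.length : Int))
    (hcan : canId info.length c = canId info.length x) :
    valB info ch fuel s w vis fr c = valB info ch fuel s w vis fr x := by
  unfold canId at hcan
  have hinfo : PySem.List.pyGetD info c 0 = PySem.List.pyGetD info x 0 := by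
    rw [pyGetD_mod info c 0 hc1 hc2, pyGetD_mod info x 0 hx1 hx2, hcan]
  have hvset : PySem.List.pySetD vis c true = PySem.List.pySetD vis x true := by
    rw [pySetD_mod vis c true (by rw [hv]; exact hc1) (by rw [hv]; exact hc2),
      pySetD_mod vis x true (by rw [hv]; exact hx1) (by rw [hv]; exact hx2), hv, hcan]
  have hbucket : PySem.List.pyGetD ch c [] = PySem.List.pyGetD ch x [] := by
    rw [pyGetD_mod ch c [] (by rw [hch]; exact hc1) (by rw [hch]; exact hc2),
      pyGetD_mod ch x [] (by rw [hch]; exact hx1) (by rw [hch]; exact hx2), hch, hcan]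
  unfold valB
  rw [hinfo, hvset, hbucket]

-- the expandable child picked out of one edge (A's candidate)
def pick (vis : List Bool) (e : List Int) : Option Int :=
  match e with
  | [p, c] =>
    if PySem.List.pyGetD vis p false && !PySem.List.pyGetD vis c false then
      some c
    else none
  | _ => none

-- B's frontier invariant: the unvisited frontier entries denote exactly the
-- canonical ids of A's expandable children
def InvF (info : List Int) (edges : List (List Int)) (vis : List Bool) (fr : List Int) : Prop :=
  (∀ x ∈ fr, -(info.length : Int) ≤ x ∧ x < (info.length : Int)) ∧
  ∀ y : Int,
    ((∃ x ∈ fr, PySem.List.pyGetD vis x false = false ∧ canId info.length x = y) ↔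
     (∃ p c : Int, [p, c] ∈ edges ∧ PySem.List.pyGetD vis p false = true ∧
        PySem.List.pyGetD vis c false = false ∧ canId info.length c = y))

lemma InvF_preserve {info : List Int} {edges : List (List Int)}
    (hg : goodEdges info edges) {vis : List Bool} {fr : List Int} {c : Int}
    (hv : vis.length = info.length)
    (hc1 : -(info.length : Int) ≤ c) (hc2 : c < (info.length : Int))
    (hInv : InvF info edges vis fr) :
    InvF info edges (PySem.List.pySetD vis c true)
      (fr.filter (fun x => !PySem.List.pyGetD (PySem.List.pySetD vis c true) x false) ++
        PySem.List.pyGetD (childrenOf info.length edges) c []) := by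
  obtain ⟨hrange, hiff⟩ := hInv
  have hget : ∀ z : Int, -(info.length : Int) ≤ z → z < (info.length : Int) →
      PySem.List.pyGetD (PySem.List.pySetD vis c true) z false =
        if canId info.length z = canId info.length c then true
        else PySem.List.pyGetD vis z false := by
    intro z hz1 hz2
    have := pyGetD_pySetD_mod vis c z true false
      (by rw [hv]; exact hc1) (by rw [hv]; exact hc2)
      (by rw [hv]; exact hz1) (by rw [hv]; exact hz2)
    rw [this, hv]
    rfl
  constructor
  · intro x hx
    rcases List.mem_append.mp hx with hx' | hx'
    · exact hrange x (List.mem_of_mem_filter hx')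
    · obtain ⟨p, hm, -⟩ := (mem_bucket hg c x hc1 hc2).mp hx'
      obtain ⟨p', c', heq, -, -, hcx1, hcx2⟩ := hg _ hm
      injection heq with h1 h2
      injection h2 with h2 _
      subst h1; subst h2
      exact ⟨hcx1, hcx2⟩
  · intro y
    constructor
    · rintro ⟨x, hx, hunv, rfl⟩
      rcases List.mem_append.mp hx with hx' | hx'
      · -- an old frontier entry, still unvisited after marking c
        have hxfr := List.mem_of_mem_filter hx'
        obtain ⟨hxr1, hxr2⟩ := hrange x hxfr
        have hxc : canId info.length x ≠ canId info.length c := by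
          intro h
          rw [hget x hxr1 hxr2, if_pos h] at hunv
          exact absurd hunv (by simp)
        have hold : PySem.List.pyGetD vis x false = false := by
          rw [hget x hxr1 hxr2, if_neg hxc] at hunv
          exact hunv
        obtain ⟨p, c', hm, hpT, hcF, hcanc⟩ :=
          (hiff (canId info.length x)).mp ⟨x, hxfr, hold, rfl⟩
        obtain ⟨p0, c0, heq, hp1, hp2, hcc1, hcc2⟩ := hg _ hm
        injection heq with h1 h2
        injection h2 with h2 _
        subst h1; subst h2
        refine ⟨p, c', hm, ?_, ?_, hcanc⟩
        · rw [hget p hp1 hp2]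
          split <;> [rfl; exact hpT]
        · rw [hget c' hcc1 hcc2]
          have : canId info.length c' ≠ canId info.length c := by
            rw [hcanc]; exact hxc
          rw [if_neg this]
          exact hcF
      · -- a fresh child of the node just expanded
        obtain ⟨p, hm, hcp⟩ := (mem_bucket hg c x hc1 hc2).mp hx'
        obtain ⟨p0, c0, heq, hp1, hp2, hcx1, hcx2⟩ := hg _ hm
        injection heq with h1 h2
        injection h2 with h2 _
        subst h1; subst h2
        refine ⟨p, x, hm, ?_, hunv, rfl⟩
        rw [hget p hp1 hp2, if_pos hcp]
    · rintro ⟨p, c', hm, hpT, hcF, rfl⟩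
      obtain ⟨p0, c0, heq, hp1, hp2, hcc1, hcc2⟩ := hg _ hm
      injection heq with h1 h2
      injection h2 with h2 _
      subst h1; subst h2
      have hcnec : canId info.length c' ≠ canId info.length c := by
        intro h
        rw [hget c' hcc1 hcc2, if_pos h] at hcF
        exact absurd hcF (by simp)
      have hcoldF : PySem.List.pyGetD vis c' false = false := by
        rw [hget c' hcc1 hcc2, if_neg hcnec] at hcF
        exact hcF
      by_cases hpold : PySem.List.pyGetD vis p false = true
      · -- the parent was already visited: an old frontier entry witnesses
        obtain ⟨x, hxfr, hxF, hxcan⟩ :=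
          (hiff (canId info.length c')).mpr ⟨p, c', hm, hpold, hcoldF, rfl⟩
        obtain ⟨hxr1, hxr2⟩ := hrange x hxfr
        have hxF' : PySem.List.pyGetD (PySem.List.pySetD vis c true) x false = false := by
          rw [hget x hxr1 hxr2, if_neg (by rw [hxcan]; exact hcnec)]
          exact hxF
        refine ⟨x, List.mem_append.mpr (Or.inl ?_), hxF', hxcan⟩
        exact List.mem_filter.mpr ⟨hxfr, by simp [hxF']⟩
      · -- the parent just became visited: c' is in the appended bucket
        have hpc : canId info.length p = canId info.length c := by
          by_contra hne
          rw [hget p hp1 hp2, if_neg hne] at hpT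
          exact hpold hpT
        refine ⟨c', List.mem_append.mpr (Or.inr ?_), hcF, rfl⟩
        exact (mem_bucket hg c c' hc1 hc2).mpr ⟨p, hm, hpc⟩

-- ===== the main induction =====

lemma main_equiv (info : List Int) (edges : List (List Int)) (hg : goodEdges info edges) :
    ∀ (fuel : Nat) (s w : Int) (vis : List Bool) (fr : List Int),
      vis.length = info.length → InvF info edges vis fr → w < s →
      ∀ x : Int, 0 ≤ x →
        List.foldl max x (dfsA info edges fuel s w vis []) =
          max x (dfsB info (childrenOf info.length edges) fuel s w vis fr) := by
  intro fuel
  induction fuel with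
  | zero =>
    intro s w vis fr hlen hInv hws x hx
    simp only [dfsA, dfsB, List.foldl_nil]
    omega
  | succ n ih =>
    intro s w vis fr hlen hInv hws x hx
    have hnot : ¬ s ≤ w := not_le.mpr hws
    have hchlen : (childrenOf info.length edges).length = info.length :=
      childrenOf_length info.length edges
    rw [dfsA_succ_pos info edges n s w vis hws, List.foldl_cons]
    show _ = max x (dfsB info (childrenOf info.length edges) (n+1) s w vis fr)
    simp only [dfsB, if_neg hnot]
    rw [dfsB_fold_eq_max]
    -- A's flatMap folds to the same running max over valB of its candidates
    have hstep : ∀ l : List (List Int), (∀ e ∈ l, e ∈ edges) → ∀ y : Int, 0 ≤ y →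
        List.foldl max y (l.flatMap (stepA info edges n s w vis)) =
          List.foldl max y ((l.filterMap (pick vis)).map
            (valB info (childrenOf info.length edges) n s w vis fr)) := by
      intro l
      induction l with
      | nil => intro _ y hy; rfl
      | cons e t iht =>
        intro hsub y hy
        have he : e ∈ edges := hsub e List.mem_cons_self
        obtain ⟨p, c, rfl, hp1, hp2, hc1, hc2⟩ := hg e he
        have hsub' : ∀ e ∈ t, e ∈ edges := fun e h => hsub e (List.mem_cons_of_mem _ h)
        rw [List.flatMap_cons, List.foldl_append]
        by_cases hcond :
            (PySem.List.pyGetD vis p false && !PySem.List.pyGetD vis c false) = true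
        · have hpick : pick vis [p, c] = some c := by
            simp only [pick, if_pos hcond]
          have hA0 : stepA info edges n s w vis [p, c] =
              dfsA info edges n
                (s + (if PySem.List.pyGetD info c 0 = 0 then 1 else 0))
                (w + (if PySem.List.pyGetD info c 0 = 1 then 1 else 0))
                (PySem.List.pySetD vis c true) [] := by
            simp only [stepA, if_pos hcond]
          rw [hA0]
          have hInv' := InvF_preserve hg hlen hc1 hc2 hInv
          have hinner : List.foldl max y
              (dfsA info edges n
                (s + (if PySem.List.pyGetD info c 0 = 0 then 1 else 0))
                (w + (if PySem.List.pyGetD info c 0 = 1 then 1 else 0))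
                (PySem.List.pySetD vis c true) []) =
              max y (valB info (childrenOf info.length edges) n s w vis fr c) := by
            by_cases hsw' :
                s + (if PySem.List.pyGetD info c 0 = 0 then 1 else 0) ≤
                w + (if PySem.List.pyGetD info c 0 = 1 then 1 else 0)
            · rw [dfsA_prune _ _ _ _ _ _ hsw', List.foldl_nil]
              unfold valB
              rw [dfsB_prune _ _ _ _ _ _ _ hsw']
              omega
            · exact ih _ _ _ _
                (by rw [PySem.List.length_pySetD]; exact hlen)
                hInv' (not_le.mp hsw') y hy
          rw [hinner, List.filterMap_cons, hpick, List.map_cons, List.foldl_cons]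
          exact iht hsub' _ (by omega)
        · have hpick : pick vis [p, c] = none := by
            simp only [pick, if_neg hcond]
          have hA0 : stepA info edges n s w vis [p, c] = [] := by
            simp only [stepA, if_neg hcond]
          rw [hA0, List.foldl_nil, List.filterMap_cons, hpick]
          exact iht hsub' y hy
    -- A's candidates and B's unvisited frontier entries carry the same valB values
    have hiff : ∀ a : Int,
        a ∈ (edges.filterMap (pick vis)).map
              (valB info (childrenOf info.length edges) n s w vis fr) ↔
        a ∈ (fr.filter (fun node => !PySem.List.pyGetD vis node false)).map
              (valB info (childrenOf info.length edges) n s w vis fr) := by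
      intro a
      simp only [List.mem_map]
      constructor
      · rintro ⟨c0, hc0, rfl⟩
        obtain ⟨e, he, hpe⟩ := List.mem_filterMap.mp hc0
        obtain ⟨p, c, rfl, hp1, hp2, hcc1, hcc2⟩ := hg e he
        simp only [pick] at hpe
        by_cases hcond :
            (PySem.List.pyGetD vis p false && !PySem.List.pyGetD vis c false) = true
        · rw [if_pos hcond, Option.some_inj] at hpe
          subst hpe
          obtain ⟨h1, h2⟩ := Bool.and_eq_true_iff.mp hcond
          have h2' : PySem.List.pyGetD vis c false = false := by
            cases hb : PySem.List.pyGetD vis c false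
            · rfl
            · rw [hb] at h2; exact absurd h2 (by simp)
          obtain ⟨xw, hxfr, hxF, hxcan⟩ := (hInv.2 (canId info.length c)).mpr
            ⟨p, c, he, h1, h2', rfl⟩
          obtain ⟨hx1, hx2⟩ := hInv.1 xw hxfr
          refine ⟨xw, List.mem_filter.mpr ⟨hxfr, by simp [hxF]⟩, ?_⟩
          exact valB_alias info _ hchlen n s w vis hlen fr hx1 hx2 hcc1 hcc2 hxcan
        · rw [if_neg hcond] at hpe; exact absurd hpe (by simp)
      · rintro ⟨x0, hx0, rfl⟩
        obtain ⟨hxfr, hxunv⟩ := List.mem_filter.mp hx0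
        have hxF : PySem.List.pyGetD vis x0 false = false := by
          cases hb : PySem.List.pyGetD vis x0 false
          · rfl
          · rw [hb] at hxunv; exact absurd hxunv (by simp)
        obtain ⟨hx1, hx2⟩ := hInv.1 x0 hxfr
        obtain ⟨p, c, hm, hpT, hcF, hccan⟩ := (hInv.2 (canId info.length x0)).mp
          ⟨x0, hxfr, hxF, rfl⟩
        obtain ⟨p0, c0, heq, hp1, hp2, hcc1, hcc2⟩ := hg _ hm
        injection heq with e1 e2
        injection e2 with e2 _
        subst e1; subst e2
        have hpk : pick vis [p, c] = some c := by
          simp only [pick, hpT, hcF]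
          rfl
        refine ⟨c, List.mem_filterMap.mpr ⟨[p, c], hm, hpk⟩, ?_⟩
        exact valB_alias info _ hchlen n s w vis hlen fr hcc1 hcc2 hx1 hx2 hccan
    rw [hstep edges (fun _ h => h) (max x s) (by omega),
      foldl_max_eq_of_mem_iff _ _ hiff, foldl_max_max]

-- ===== the initial state =====

lemma init_vis_get {info : List Int} (hne : info ≠ []) (z : Int)
    (hz1 : -(info.length : Int) ≤ z) (hz2 : z < (info.length : Int)) :
    PySem.List.pyGetD (PySem.List.pySetD (List.replicate info.length false) 0 true) z false =
      if canId info.length z = 0 then true else false := by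
  have hpos : 0 < info.length := List.length_pos_iff.mpr hne
  have h := pyGetD_pySetD_mod (List.replicate info.length false) 0 z true false
    (by simp only [List.length_replicate]; omega) (by simp only [List.length_replicate]; omega) (by simp only [List.length_replicate]; omega) (by simp only [List.length_replicate]; omega)
  simp only [List.length_replicate] at h
  have h0 : PySem.Int.mod 0 ((info.length : Nat) : Int) = 0 := by
    rw [PySem.Int.mod_eq_emod_of_pos (by omega)]
    simp
  rw [h, h0]
  unfold canId
  by_cases hc : PySem.Int.mod z (info.length : Int) = 0
  · rw [if_pos hc, if_pos hc]
  · rw [if_neg hc, if_neg hc]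
    exact pyGetD_replicate info.length z false false hz1 hz2

lemma InvF_init {info : List Int} {edges : List (List Int)}
    (hne : info ≠ []) (hg : goodEdges info edges) :
    InvF info edges (PySem.List.pySetD (List.replicate info.length false) 0 true)
      (PySem.List.pyGetD (childrenOf info.length edges) 0 []) := by
  have hpos : 0 < info.length := List.length_pos_iff.mpr hne
  have h01 : -(info.length : Int) ≤ 0 := by omega
  have h02 : (0 : Int) < (info.length : Int) := by omega
  constructor
  · intro x hx
    obtain ⟨p, hm, -⟩ := (mem_bucket hg 0 x h01 h02).mp hx
    obtain ⟨p0, c0, heq, -, -, hx1, hx2⟩ := hg _ hm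
    injection heq with e1 e2
    injection e2 with e2 _
    subst e1; subst e2
    exact ⟨hx1, hx2⟩
  · intro y
    constructor
    · rintro ⟨x, hx, hunv, rfl⟩
      obtain ⟨p, hm, hcp⟩ := (mem_bucket hg 0 x h01 h02).mp hx
      obtain ⟨p0, c0, heq, hp1, hp2, hx1, hx2⟩ := hg _ hm
      injection heq with e1 e2
      injection e2 with e2 _
      subst e1; subst e2
      refine ⟨p, x, hm, ?_, hunv, rfl⟩
      rw [init_vis_get hne p hp1 hp2, if_pos (by rw [hcp]; exact canId_zero hpos)]
    · rintro ⟨p, c, hm, hpT, hcF, rfl⟩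
      obtain ⟨p0, c0, heq, hp1, hp2, hc1, hc2⟩ := hg _ hm
      injection heq with e1 e2
      injection e2 with e2 _
      subst e1; subst e2
      have hp0 : canId info.length p = 0 := by
        by_contra hne0
        rw [init_vis_get hne p hp1 hp2, if_neg hne0] at hpT
        exact absurd hpT (by simp)
      refine ⟨c, ?_, hcF, rfl⟩
      exact (mem_bucket hg 0 c h01 h02).mpr
        ⟨p, hm, by rw [hp0, canId_zero hpos]⟩

-- ===== VERDICT (by name: the statement is the Claim_ definition above) =====
theorem solution_spec : Claim_equal_solution := by
  intro info edges _ hpre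
  obtain ⟨hne, hsh⟩ := hpre
  have hg := goodEdges_of_pre hsh
  have hpos : 0 < info.length := List.length_pos_iff.mpr hne
  simp only [Spec_solution, solution, solution_alt]
  have hlenv : (PySem.List.pySetD (List.replicate info.length false) 0 true).length
      = info.length := by
    rw [show ((0:Int)) = ((0:Nat) : Int) from rfl, PySem.List.pySetD_natCast]
    simp
  have hmain := main_equiv info edges hg (info.length + 1) 1 0
    (PySem.List.pySetD (List.replicate info.length false) 0 true)
    (PySem.List.pyGetD (childrenOf info.length edges) 0 [])
    hlenv (InvF_init hne hg) (by norm_num) 0 (le_refl 0)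
  have hone : (0:Int) < 1 := by norm_num
  rw [dfsA_succ_pos info edges info.length 1 0 _ hone] at hmain ⊢
  rw [PySem.List.max?_id_cons, Option.getD_some]
  rw [List.foldl_cons] at hmain
  have hB := dfsB_nonneg info (childrenOf info.length edges) (info.length + 1) 1 0
    (PySem.List.pySetD (List.replicate info.length false) 0 true)
    (PySem.List.pyGetD (childrenOf info.length edges) 0 []) (le_refl 0)
  have h01 : max (0:Int) 1 = 1 := by norm_num
  rw [h01] at hmain
  omega
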